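-- pv_equiv track=rewrite | github.com/Kukrynitza/BSUIR | course-3-semester-2/IIAZIIS/lab-2/lab-2-IIAZIIS/backend/core/shared/morphology/analyzer.py | extract_grammemes
-- ===== SOURCE A (Python) =====
-- _CASE_MAP = {
--     'nomn': 'именительный',
--     'gent': 'родительный',
--     'datv': 'дательный',
--     'accs': 'винительный',
--     'ablt': 'творительный',
--     'loct': 'предложный'
-- }
--
-- _NUMBER_MAP = {
--     'sing': 'единственное',
--     'plur': 'множественное'
-- }
--
-- _GENDER_MAP = {
--     'masc': 'мужской',
--     'femn': 'женский',
--     'neut': 'средний'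
-- }
--
-- def extract_grammemes(tag_grammemes: frozenset) -> dict[str, str]:
--     result: dict[str, str] = {}
--
--     for tag, value in _CASE_MAP.items():
--         if tag in tag_grammemes:
--             result['падеж'] = value
--             break
--
--     for tag, value in _NUMBER_MAP.items():
--         if tag in tag_grammemes:
--             result['число'] = value
--             break
--
--     for tag, value in _GENDER_MAP.items():
--         if tag in tag_grammemes:
--             result['род'] = value
--             break
--
--     return result
-- ===== SOURCE B (Python) =====
-- _TABLE = [
--     ('nomn', 'падеж', 'именительный'),
--     ('gent', 'падеж', 'родительный'),
--     ('datv', 'падеж', 'дательный'),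
--     ('accs', 'падеж', 'винительный'),
--     ('ablt', 'падеж', 'творительный'),
--     ('loct', 'падеж', 'предложный'),
--     ('sing', 'число', 'единственное'),
--     ('plur', 'число', 'множественное'),
--     ('masc', 'род', 'мужской'),
--     ('femn', 'род', 'женский'),
--     ('neut', 'род', 'средний'),
-- ]
--
--
-- def extract_grammemes(tag_grammemes: frozenset) -> dict[str, str]:
--     result: dict[str, str] = {}
--     for tag, key, value in _TABLE:
--         if tag in tag_grammemes:
--             result.setdefault(key, value)
--     return result
-- ===== Notes on version B (the rewrite author's own statement) =====
-- stated objective: simpler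
-- what changed: Replaces the three separate break-loops over three constant maps by one pass over a single merged ordered table using dict.setdefault, which reproduces the first-match-per-category semantics.
import Mathlib
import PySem

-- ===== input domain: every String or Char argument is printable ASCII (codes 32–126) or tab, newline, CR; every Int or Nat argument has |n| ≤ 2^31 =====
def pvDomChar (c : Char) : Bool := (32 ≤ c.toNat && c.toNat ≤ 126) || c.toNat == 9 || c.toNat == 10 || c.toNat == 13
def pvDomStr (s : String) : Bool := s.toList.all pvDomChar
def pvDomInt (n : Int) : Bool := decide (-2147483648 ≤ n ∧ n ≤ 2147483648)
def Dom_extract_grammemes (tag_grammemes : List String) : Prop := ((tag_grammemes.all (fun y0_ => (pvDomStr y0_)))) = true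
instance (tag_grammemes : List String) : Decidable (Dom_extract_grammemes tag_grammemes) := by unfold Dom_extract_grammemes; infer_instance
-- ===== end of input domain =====

-- B replaces A's three break-loops over three constant maps by one setdefault pass over a single merged ordered table (objective: simpler).

-- ===== PORT A =====
def pvCaseMap : List (String × String) :=
  [("nomn", "именительный"), ("gent", "родительный"), ("datv", "дательный"),
   ("accs", "винительный"), ("ablt", "творительный"), ("loct", "предложный")]

def pvNumberMap : List (String × String) := [("sing", "единственное"), ("plur", "множественное")]

def pvGenderMap : List (String × String) := [("masc", "мужской"), ("femn", "женский"), ("neut", "средний")]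

-- 'for tag, value in M.items(): if tag in tag_grammemes: result[key] = value; break'
def pvLoopA (m : List (String × String)) (key : String) (ts : List String)
    (r : PySem.Dict String String) : PySem.Dict String String :=
  match m with
  | [] => r
  | (tag, v) :: rest => if ts.contains tag then r.insert key v else pvLoopA rest key ts r

def extract_grammemes (tag_grammemes : List String) : List (String × String) :=
  let r : PySem.Dict String String := PySem.Dict.empty
  let r := pvLoopA pvCaseMap "падеж" tag_grammemes r
  let r := pvLoopA pvNumberMap "число" tag_grammemes r
  let r := pvLoopA pvGenderMap "род" tag_grammemes r
  r.items

-- ===== PORT B =====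
def pvTable : List (String × String × String) :=
  [("nomn", "падеж", "именительный"), ("gent", "падеж", "родительный"),
   ("datv", "падеж", "дательный"), ("accs", "падеж", "винительный"),
   ("ablt", "падеж", "творительный"), ("loct", "падеж", "предложный"),
   ("sing", "число", "единственное"), ("plur", "число", "множественное"),
   ("masc", "род", "мужской"), ("femn", "род", "женский"), ("neut", "род", "средний")]

def extract_grammemes_alt (tag_grammemes : List String) : List (String × String) :=
  (pvTable.foldl
    (fun r e => if tag_grammemes.contains e.1 then r.setdefault e.2.1 e.2.2 else r)
    (PySem.Dict.empty : PySem.Dict String String)).items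

-- ===== PRECONDITION & SPEC =====
def Spec_extract_grammemes (tag_grammemes : List String) (out : List (String × String)) : Prop := out = extract_grammemes_alt tag_grammemes
instance (tag_grammemes : List String) (out : List (String × String)) : Decidable (Spec_extract_grammemes tag_grammemes out) := by unfold Spec_extract_grammemes; infer_instance

-- ===== CLAIM (what is proved, stated in full; the proofs are below) =====
def Claim_equal_extract_grammemes : Prop := ∀ (tag_grammemes : List String), Dom_extract_grammemes tag_grammemes → Spec_extract_grammemes tag_grammemes (extract_grammemes tag_grammemes)

-- ===== LEMMAS AND PROOFS =====

-- A's break-loop finds the first pair of m whose tag is in ts.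
theorem pvLoopA_eq (m : List (String × String)) (key : String) (ts : List String)
    (r : PySem.Dict String String) :
    pvLoopA m key ts r =
      (match m.find? (fun p => ts.contains p.1) with
       | none => r
       | some p => r.insert key p.2) := by
  induction m with
  | nil => rfl
  | cons hd tl ih =>
    obtain ⟨t, v⟩ := hd
    by_cases h : t ∈ ts
    · simp [pvLoopA, List.contains_eq_mem, h, List.find?]
    · simp [pvLoopA, List.contains_eq_mem, h, List.find?, ih]

-- B's fold step for an arbitrary segment whose entries all carry the same result key.
def pvStep (ts : List String) (r : PySem.Dict String String) (e : String × String × String) :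
    PySem.Dict String String :=
  if ts.contains e.1 then r.setdefault e.2.1 e.2.2 else r

-- Once the key is present, a whole same-key segment of the table leaves the dict unchanged.
theorem pvSegB_skip (m : List (String × String)) (key : String) (ts : List String)
    (r : PySem.Dict String String) (h : r.contains key = true) :
    (m.map (fun p => (p.1, key, p.2))).foldl (pvStep ts) r = r := by
  induction m with
  | nil => rfl
  | cons hd tl ih =>
    obtain ⟨t, v⟩ := hd
    by_cases ht : t ∈ ts
    · simp [pvStep, List.contains_eq_mem, ht, PySem.Dict.setdefault_of_contains _ _ h, ih]
    · simp [pvStep, List.contains_eq_mem, ht, ih]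

-- On a fresh key, the setdefault pass over a same-key segment inserts the first match.
theorem pvSegB_eq (m : List (String × String)) (key : String) (ts : List String)
    (r : PySem.Dict String String) (h : r.contains key = false) :
    (m.map (fun p => (p.1, key, p.2))).foldl (pvStep ts) r =
      (match m.find? (fun p => ts.contains p.1) with
       | none => r
       | some p => r.insert key p.2) := by
  induction m with
  | nil => rfl
  | cons hd tl ih =>
    obtain ⟨t, v⟩ := hd
    by_cases ht : t ∈ ts
    · simp only [List.map_cons, List.foldl_cons, pvStep, List.contains_eq_mem, ht,
        decide_true, if_pos, PySem.Dict.setdefault_of_not_contains _ _ h]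
      rw [pvSegB_skip tl key ts _ (PySem.Dict.contains_insert_self r key v)]
      simp [List.find?, ht]
    · simp only [List.map_cons, List.foldl_cons, pvStep, List.contains_eq_mem, ht,
        decide_false, Bool.false_eq_true, if_neg, not_false_eq_true]
      rw [ih]
      simp [List.find?, List.contains_eq_mem, ht]

theorem pvTable_split :
    pvTable = pvCaseMap.map (fun p => (p.1, "падеж", p.2))
      ++ pvNumberMap.map (fun p => (p.1, "число", p.2))
      ++ pvGenderMap.map (fun p => (p.1, "род", p.2)) := by
  decide

-- ===== VERDICT (by name: the statement is the Claim_ definition above) =====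
theorem extract_grammemes_spec : Claim_equal_extract_grammemes := by
  intro ts _
  unfold Spec_extract_grammemes extract_grammemes extract_grammemes_alt
  rw [pvTable_split]
  show (pvLoopA pvGenderMap "род" ts (pvLoopA pvNumberMap "число" ts
        (pvLoopA pvCaseMap "падеж" ts PySem.Dict.empty))).items = _
  have hfold : ∀ (l : List (String × String × String)) (r : PySem.Dict String String),
      l.foldl (fun r e => if ts.contains e.1 then r.setdefault e.2.1 e.2.2 else r) r
        = l.foldl (pvStep ts) r := by
    intro l r; rfl
  rw [hfold, List.foldl_append, List.foldl_append]
  rw [pvSegB_eq pvCaseMap "падеж" ts PySem.Dict.empty (by decide)]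
  rw [pvLoopA_eq pvCaseMap "падеж" ts PySem.Dict.empty]
  cases hc : pvCaseMap.find? (fun p => ts.contains p.1) with
  | none =>
    simp only
    rw [pvSegB_eq pvNumberMap "число" ts PySem.Dict.empty (by decide),
        pvLoopA_eq pvNumberMap "число" ts]
    cases hn : pvNumberMap.find? (fun p => ts.contains p.1) with
    | none =>
      simp only
      rw [pvSegB_eq pvGenderMap "род" ts PySem.Dict.empty (by decide),
          pvLoopA_eq pvGenderMap "род" ts]
    | some pn =>
      simp only
      rw [pvSegB_eq pvGenderMap "род" ts _ (by simp [PySem.Dict.contains_insert]),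
          pvLoopA_eq pvGenderMap "род" ts]
  | some pc =>
    simp only
    rw [pvSegB_eq pvNumberMap "число" ts _ (by simp [PySem.Dict.contains_insert]),
        pvLoopA_eq pvNumberMap "число" ts]
    cases hn : pvNumberMap.find? (fun p => ts.contains p.1) with
    | none =>
      simp only
      rw [pvSegB_eq pvGenderMap "род" ts _ (by simp [PySem.Dict.contains_insert]),
          pvLoopA_eq pvGenderMap "род" ts]
    | some pn =>
      simp only
      rw [pvSegB_eq pvGenderMap "род" ts _ (by simp [PySem.Dict.contains_insert]),
          pvLoopA_eq pvGenderMap "род" ts]
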